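-- pv_equiv track=rewrite | github.com/MrZLeviatan/Analizador_Lexico_Prolog | src/tokens/numero_reales.py | es_numero_real
-- ===== SOURCE A (Python) =====
-- def es_numero_real(cadena: str) -> bool:
--     """
--     Verifica si una cadena es un número real válido en Prolog.
--     Reglas:
--     - Debe contener exactamente un punto.
--     - Debe tener al menos un dígito antes y después del punto.
--     """
--
--     punto_encontrado = False        # Bandera para indicar si ya se encontró un punto
--     digitos_antes = 0               # Contador de dígitos antes del punto
--     digitos_despues = 0            # Contador de dígitos después del punto
--     despues_del_punto = False      # Bandera para saber si se están procesando los dígitos después del punto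
--
--     for char in cadena:         # For de toda la vida
--         if char == '.':
--             if punto_encontrado:
--                 # Si ya se encontró un punto anteriormente, entonces hay más de uno → inválido
--                 return False
--             punto_encontrado = True    # Se marca que se ha encontrado el punto
--             despues_del_punto = True  # Se activa el procesamiento de la parte decimal
--         elif char >= '0' and char <= '9':
--             if not punto_encontrado:
--                 digitos_antes += 1    # Se cuenta un dígito en la parte entera
--             else:
--                 digitos_despues += 1  # Se cuenta un dígito en la parte decimal
--         else:
--             # Si el carácter no es un punto ni un dígito → inválido
--             return False
--
--     # Validar que se haya encontrado un solo punto y que haya al menos un dígito en cada lado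
--     if punto_encontrado and digitos_antes >= 1 and digitos_despues >= 1:
--         return True
--     else:
--         return False
-- ===== SOURCE B (Python) =====
-- def es_numero_real(cadena: str) -> bool:
--     partes = cadena.split('.')
--     if len(partes) != 2:
--         return False
--     entera, decimal = partes
--     return (entera != "" and decimal != ""
--             and all('0' <= c <= '9' for c in entera)
--             and all('0' <= c <= '9' for c in decimal))
-- ===== Notes on version B (the rewrite author's own statement) =====
-- stated objective: simpler
-- what changed: Replaces the flag-and-counter character loop with a a split at the dot separator followed by a non-empty/all-ASCII-digit check of the two parts.
import Mathlib
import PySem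

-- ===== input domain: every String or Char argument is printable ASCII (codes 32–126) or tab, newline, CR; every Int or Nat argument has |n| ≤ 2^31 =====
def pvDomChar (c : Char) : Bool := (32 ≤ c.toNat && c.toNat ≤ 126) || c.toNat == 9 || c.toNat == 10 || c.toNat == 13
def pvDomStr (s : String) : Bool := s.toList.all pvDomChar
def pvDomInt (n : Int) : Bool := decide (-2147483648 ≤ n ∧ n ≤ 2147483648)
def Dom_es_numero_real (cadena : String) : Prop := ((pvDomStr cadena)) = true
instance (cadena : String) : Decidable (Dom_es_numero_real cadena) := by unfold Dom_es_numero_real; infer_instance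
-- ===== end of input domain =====

-- B replaces A's flag-and-counter character loop by splitting on the dot separator and checking that both parts are non-empty and all ASCII digits (objective: simpler).


-- ===== PORT A =====
-- the for-loop of A: state (punto_encontrado, digitos_antes, digitos_despues); the trailing
-- 'despues_del_punto' flag of A is always equal to 'punto_encontrado' and is elided.
-- The [] case is A's final 'if punto_encontrado and digitos_antes >= 1 and digitos_despues >= 1'.
def esLoopA : List Char → Bool → Int → Int → Bool
  | [], punto, antes, despues => punto && decide (antes ≥ 1) && decide (despues ≥ 1)
  | c :: rest, punto, antes, despues =>
    if c = '.' then
      if punto then false else esLoopA rest true antes despues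
    else if '0' ≤ c ∧ c ≤ '9' then
      if punto then esLoopA rest punto antes (despues + 1)
      else esLoopA rest punto (antes + 1) despues
    else false

def es_numero_real (cadena : String) : Bool :=
  esLoopA cadena.toList false 0 0

-- ===== PORT B =====
def es_numero_real_alt (cadena : String) : Bool :=
  let partes := PySem.Chars.splitOn cadena.toList ['.']
  match partes with
  | [entera, decimal] =>
      decide (entera ≠ []) && decide (decimal ≠ []) &&
      entera.all (fun c => decide ('0' ≤ c ∧ c ≤ '9')) &&
      decimal.all (fun c => decide ('0' ≤ c ∧ c ≤ '9'))
  | _ => false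

-- ===== PRECONDITION & SPEC =====
def Spec_es_numero_real (cadena : String) (out : Bool) : Prop := out = es_numero_real_alt cadena
instance (cadena : String) (out : Bool) : Decidable (Spec_es_numero_real cadena out) := by unfold Spec_es_numero_real; infer_instance

-- ===== CLAIM (what is proved, stated in full; the proofs are below) =====
def Claim_equal_es_numero_real : Prop := ∀ (cadena : String), Dom_es_numero_real cadena → Spec_es_numero_real cadena (es_numero_real cadena)

-- ===== LEMMAS AND PROOFS =====

-- a simple structural model of str.split('.') (single-character separator)
def mySplit : List Char → List (List Char)
  | [] => [[]]
  | c :: rest => if c = '.' then [] :: mySplit rest else (mySplit rest).modifyHead (c :: ·)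

theorem mySplit_ne_nil (cs : List Char) : mySplit cs ≠ [] := by
  induction cs with
  | nil => simp [mySplit]
  | cons c rest ih =>
    simp only [mySplit]
    split
    · simp
    · cases h : mySplit rest with
      | nil => exact absurd h ih
      | cons a t => simp

theorem splitOn_go_dot (cs : List Char) :
    ∀ fuel cur acc, cs.length ≤ fuel →
      PySem.Chars.splitOn.go ['.'] fuel cs cur acc
        = acc.reverse ++ (mySplit cs).modifyHead (cur.reverse ++ ·) := by
  induction cs with
  | nil =>
    intro fuel cur acc _
    cases fuel <;> simp [PySem.Chars.splitOn.go, mySplit, List.modifyHead]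
  | cons c rest ih =>
    intro fuel cur acc hfuel
    cases fuel with
    | zero => simp at hfuel
    | succ f =>
      by_cases hc : c = '.'
      · subst hc
        rw [show PySem.Chars.splitOn.go ['.'] (f+1) ('.' :: rest) cur acc
              = PySem.Chars.splitOn.go ['.'] f rest [] (cur.reverse :: acc) by
            simp [PySem.Chars.splitOn.go, List.isPrefixOf]]
        rw [ih f [] (cur.reverse :: acc) (by simpa using hfuel)]
        simp only [mySplit, List.modifyHead]
        cases h : mySplit rest with
        | nil => exact absurd h (mySplit_ne_nil rest)
        | cons a t => simp
      · rw [show PySem.Chars.splitOn.go ['.'] (f+1) (c :: rest) cur acc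
              = PySem.Chars.splitOn.go ['.'] f rest (c :: cur) acc by
            simp [PySem.Chars.splitOn.go, List.isPrefixOf, Ne.symm hc]]
        rw [ih f (c :: cur) acc (by simpa using hfuel)]
        simp only [mySplit, if_neg hc]
        cases h : mySplit rest with
        | nil => exact absurd h (mySplit_ne_nil rest)
        | cons a t => simp [List.modifyHead]

theorem splitOn_dot (cs : List Char) : PySem.Chars.splitOn cs ['.'] = mySplit cs := by
  have := splitOn_go_dot cs (cs.length + 1) [] [] (by omega)
  simp only [PySem.Chars.splitOn] at *
  rw [this]
  cases h : mySplit cs with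
  | nil => exact absurd h (mySplit_ne_nil cs)
  | cons a t => simp [List.modifyHead]

def isDig (c : Char) : Bool := decide ('0' ≤ c ∧ c ≤ '9')

theorem dot_not_dig : isDig '.' = false := by decide

-- either no dot (split is [cs]) or a dot occurs (split has ≥ 2 pieces)
theorem mySplit_shape (cs : List Char) :
    (mySplit cs = [cs] ∧ '.' ∉ cs) ∨ (2 ≤ (mySplit cs).length ∧ '.' ∈ cs) := by
  induction cs with
  | nil => left; simp [mySplit]
  | cons c rest ih =>
    by_cases hc : c = '.'
    · subst hc
      right
      constructor
      · simp only [mySplit]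
        cases h : mySplit rest with
        | nil => exact absurd h (mySplit_ne_nil rest)
        | cons a t => simp
      · simp
    · rcases ih with ⟨h1, h2⟩ | ⟨h1, h2⟩
      · left
        constructor
        · simp [mySplit, hc, h1, List.modifyHead]
        · simp only [List.mem_cons, not_or]
          exact ⟨Ne.symm hc, h2⟩
      · right
        constructor
        · simp only [mySplit, if_neg hc, List.length_modifyHead]
          exact h1
        · simp [h2]

-- phase 2 of A's loop (after the dot has been seen)
theorem esLoopA_after (cs : List Char) :
    ∀ antes despues, esLoopA cs true antes despues
      = (cs.all isDig && decide (antes ≥ 1) && decide (despues + cs.length ≥ 1)) := by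
  induction cs with
  | nil => intro a d; simp [esLoopA]
  | cons c rest ih =>
    intro a d
    by_cases hc : c = '.'
    · subst hc
      simp [esLoopA, List.all_cons, dot_not_dig]
    · by_cases hd : '0' ≤ c ∧ c ≤ '9'
      · rw [show esLoopA (c :: rest) true a d = esLoopA rest true a (d + 1) by
          simp [esLoopA, hc, hd]]
        rw [ih a (d + 1)]
        have : isDig c = true := by simp [isDig, hd]
        simp only [List.all_cons, this, Bool.true_and, List.length_cons]
        have h1 : (d + 1 + (rest.length : Int) ≥ 1) ↔ (d + ((rest.length : Int) + 1) ≥ 1) := by omega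
        simp only [Nat.cast_add, Nat.cast_one]
        congr 1
        exact decide_eq_decide.mpr h1
      · have : isDig c = false := by simp only [isDig, decide_eq_false_iff_not]; exact hd
        simp [esLoopA, hc, hd, List.all_cons, this]

-- phase 1 of A's loop, characterised through mySplit
theorem esLoopA_before (cs : List Char) :
    ∀ antes, esLoopA cs false antes 0
      = (match mySplit cs with
         | [e, d] => decide (antes + (e.length : Int) ≥ 1) && e.all isDig &&
                     decide (d ≠ []) && d.all isDig
         | _ => false) := by
  induction cs with
  | nil => intro a; simp [esLoopA, mySplit]
  | cons c rest ih =>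
    intro a
    by_cases hc : c = '.'
    · subst hc
      rw [show esLoopA ('.' :: rest) false a 0 = esLoopA rest true a 0 by simp [esLoopA]]
      rw [esLoopA_after rest a 0]
      simp only [mySplit, if_true]
      rcases mySplit_shape rest with ⟨h1, h2⟩ | ⟨h1, h2⟩
      · rw [h1]
        simp only [List.length_nil, Nat.cast_zero, List.all_nil]
        have : (a + (0:Int) ≥ 1) ↔ (a ≥ 1) := by omega
        rw [decide_eq_decide.mpr this]
        have : (0 + (rest.length : Int) ≥ 1) ↔ (rest ≠ []) := by
          cases rest <;> simp
        rw [decide_eq_decide.mpr this]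
        cases rest.all isDig <;> cases decide (a ≥ 1) <;> cases decide (rest ≠ []) <;> simp
      · have hall : rest.all isDig = false := by
          exact List.all_eq_false.mpr ⟨'.', h2, by simp [dot_not_dig]⟩
        rw [hall]
        cases h : mySplit rest with
        | nil => exact absurd h (mySplit_ne_nil rest)
        | cons x t =>
          cases t with
          | nil => rw [h] at h1; simp at h1
          | cons y u => cases u <;> simp
    · by_cases hd : '0' ≤ c ∧ c ≤ '9'
      · rw [show esLoopA (c :: rest) false a 0 = esLoopA rest false (a + 1) 0 by
          simp [esLoopA, hc, hd]]
        rw [ih (a + 1)]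
        have hcd : isDig c = true := by simp [isDig, hd]
        simp only [mySplit, if_neg hc]
        cases h : mySplit rest with
        | nil => exact absurd h (mySplit_ne_nil rest)
        | cons e t =>
          cases t with
          | nil => simp [List.modifyHead]
          | cons d u =>
            cases u with
            | nil =>
              simp only [List.modifyHead, List.all_cons, hcd, Bool.true_and,
                List.length_cons]
              have harit : (a + 1 + (e.length : Int) ≥ 1) ↔ (a + ((e.length + 1 : Nat) : Int) ≥ 1) := by
                push_cast
                omega
              simp only [decide_eq_decide.mpr harit]
              rfl
            | cons z v => simp [List.modifyHead]
      · have hcd : isDig c = false := by simp only [isDig, decide_eq_false_iff_not]; exact hd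
        rw [show esLoopA (c :: rest) false a 0 = false by simp [esLoopA, hc, hd]]
        simp only [mySplit, if_neg hc]
        cases h : mySplit rest with
        | nil => exact absurd h (mySplit_ne_nil rest)
        | cons e t =>
          cases t with
          | nil => simp [List.modifyHead]
          | cons d u =>
            cases u with
            | nil => simp [List.modifyHead, List.all_cons, hcd]
            | cons z v => simp [List.modifyHead]

-- ===== VERDICT (by name: the statement is the Claim_ definition above) =====
theorem es_numero_real_spec : Claim_equal_es_numero_real := by
  intro cadena _
  unfold Spec_es_numero_real es_numero_real es_numero_real_alt
  rw [esLoopA_before cadena.toList 0, splitOn_dot]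
  simp only [show (fun c => decide ('0' ≤ c ∧ c ≤ '9')) = isDig from rfl]
  cases h : mySplit cadena.toList with
  | nil => exact absurd h (mySplit_ne_nil _)
  | cons e t =>
    cases t with
    | nil => simp
    | cons d u =>
      cases u with
      | nil =>
        have hiff : ((0:Int) + (e.length : Int) ≥ 1) ↔ (e ≠ []) := by
          cases e <;> simp
        simp only [decide_eq_decide.mpr hiff]
        cases decide (e ≠ []) <;> cases decide (d ≠ []) <;>
          cases e.all isDig <;> cases d.all isDig <;> simp
      | cons z v => simp
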